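-- pv_equiv track=rewrite | github.com/RPINerd/biox_macguffins | macguffins/macguffin_utils.py | look_backward_match
-- ===== SOURCE A (Python) =====
-- def look_backward_match(iterable: list | tuple, start: int, char: str) -> int:
--     """
--     Look behind in an iterable for the next point where a character is the same
--
--     Args:
--         iterable (list | tuple): A list/tuple to look backward through
--         start (int): The initial index to being from
--         char (str): The character to look for the end of in the sequence
--
--     Returns:
--         int: The index of the next point where the character is the same
--
--     Raises:
--         ValueError: If no match is found
--     """
--     idx = start
--     end_idx = None
--     while not end_idx and idx > 0:
--         idx -= 1
--         if iterable[idx] == char: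
--             return idx + 1
--
--     raise ValueError(f"No match found looking backwards from index {start} along interable:\n{iterable}")
-- ===== SOURCE B (Python) =====
-- def look_backward_match(iterable: list | tuple, start: int, char: str) -> int:
--     """Forward full pass over range(start) keeping the last matching index."""
--     last = None
--     for idx in range(start):
--         if iterable[idx] == char:
--             last = idx
--     if last is None:
--         raise ValueError(f"No match found looking backwards from index {start} along interable:\n{iterable}")
--     return last + 1
-- ===== Notes on version B (the rewrite author's own statement) =====
-- stated objective: alternative
-- what changed: Replaced the backward scan with early exit on first hit by a single forward pass over range(start) that keeps the last matching index in an accumulator and answers after the loop.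
import Mathlib
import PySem

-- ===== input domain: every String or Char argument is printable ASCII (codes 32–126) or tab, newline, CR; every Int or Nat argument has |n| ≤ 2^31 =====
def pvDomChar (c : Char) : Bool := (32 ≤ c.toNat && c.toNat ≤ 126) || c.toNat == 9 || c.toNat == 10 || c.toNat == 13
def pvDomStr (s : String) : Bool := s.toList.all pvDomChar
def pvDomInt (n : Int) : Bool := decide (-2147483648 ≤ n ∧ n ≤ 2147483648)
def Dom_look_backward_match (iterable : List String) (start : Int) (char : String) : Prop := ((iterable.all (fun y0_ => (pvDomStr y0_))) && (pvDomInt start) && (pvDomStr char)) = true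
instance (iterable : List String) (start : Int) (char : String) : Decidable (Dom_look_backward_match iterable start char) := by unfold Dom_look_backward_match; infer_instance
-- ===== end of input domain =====

-- B replaces A's backward scan with early exit by one forward pass over range(start)
-- keeping the last matching index; same cost, different decomposition.

-- ===== PORT A =====
-- A's while loop: idx counts down from start; we recurse on the Nat value of idx.
-- On the IndexError path (pyGet? = none) and the ValueError path (idx = 0 reached)
-- the Python raises; those inputs are outside Pre_, the port returns 0 there.
def lbmLoopA (iterable : List String) (char : String) : Nat → Int
  | 0 => 0
  | n + 1 =>
    match PySem.List.pyGet? iterable (n : Int) with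
    | none => 0
    | some s => if s = char then (n : Int) + 1 else lbmLoopA iterable char n

def look_backward_match (iterable : List String) (start : Int) (char : String) : Int :=
  lbmLoopA iterable char start.toNat

-- ===== PORT B =====
-- B's for loop over range(start) with a 'last' accumulator (Option, as in Source B).
def look_backward_match_alt (iterable : List String) (start : Int) (char : String) : Int :=
  let last := (PySem.List.pyRange 0 start 1).foldl
    (fun acc idx =>
      match PySem.List.pyGet? iterable idx with
      | none => acc           -- IndexError path, outside Pre_
      | some s => if s = char then some idx else acc)
    (none : Option Int)
  match last with
  | some i => i + 1
  | none => 0                 -- ValueError path, outside Pre_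

-- ===== PRECONDITION & SPEC =====
-- A raises IndexError when start > len(iterable) (first access is iterable[start-1])
-- and ValueError when no element equal to char occurs before index start.
def Pre_look_backward_match (iterable : List String) (start : Int) (char : String) : Prop :=
  start ≤ (iterable.length : Int) ∧ char ∈ iterable.take start.toNat

instance (iterable : List String) (start : Int) (char : String) : Decidable (Pre_look_backward_match iterable start char) := by
  unfold Pre_look_backward_match; infer_instance

def pvWitness_look_backward_match : List String × Int × String := (["a", "b", "c"], 3, "b")

def Spec_look_backward_match (iterable : List String) (start : Int) (char : String) (out : Int) : Prop :=
  out = look_backward_match_alt iterable start char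

instance (iterable : List String) (start : Int) (char : String) (out : Int) : Decidable (Spec_look_backward_match iterable start char out) := by
  unfold Spec_look_backward_match; infer_instance

-- ===== CLAIM =====
def Claim_equal_look_backward_match : Prop :=
  ∀ (iterable : List String) (start : Int) (char : String),
    Dom_look_backward_match iterable start char →
    Pre_look_backward_match iterable start char →
    Spec_look_backward_match iterable start char (look_backward_match iterable start char)

-- ===== LEMMAS AND PROOFS =====

-- B's accumulator after folding the first n indices.
def lbmAccB (iterable : List String) (char : String) (n : Nat) : Option Int :=
  (PySem.List.pyRange 0 (n : Int) 1).foldl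
    (fun acc idx =>
      match PySem.List.pyGet? iterable idx with
      | none => acc
      | some s => if s = char then some idx else acc)
    (none : Option Int)

lemma lbmAccB_succ (iterable : List String) (char : String) (n : Nat) :
    lbmAccB iterable char (n + 1) =
      match PySem.List.pyGet? iterable (n : Int) with
      | none => lbmAccB iterable char n
      | some s => if s = char then some (n : Int) else lbmAccB iterable char n := by
  unfold lbmAccB
  push_cast
  rw [PySem.List.pyRange_one_succ_right (by exact_mod_cast Nat.zero_le n)]
  rw [List.foldl_append]
  simp only [List.foldl_cons, List.foldl_nil]

-- Core invariant: for n ≤ length, A's countdown loop from n equals B's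
-- accumulator over the first n indices, read back as (+1) / 0.
lemma lbm_loop_eq (iterable : List String) (char : String) (n : Nat)
    (hn : n ≤ iterable.length) :
    lbmLoopA iterable char n =
      match lbmAccB iterable char n with
      | some i => i + 1
      | none => 0 := by
  induction n with
  | zero =>
    simp [lbmLoopA, lbmAccB]
  | succ m ih =>
    have hm : m < iterable.length := hn
    have hget : PySem.List.pyGet? iterable (m : Int) = some (iterable[m]) := by
      simp [PySem.List.pyGet?, PySem.List.pyIdx?, hm]
    rw [lbmLoopA, hget, lbmAccB_succ, hget]
    by_cases hc : iterable[m] = char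
    · simp [hc]
    · simp [hc, ih (Nat.le_of_lt hm)]

-- ===== VERDICT =====
theorem look_backward_match_spec : Claim_equal_look_backward_match := by
  intro iterable start char _hdom hpre
  unfold Spec_look_backward_match look_backward_match look_backward_match_alt
  obtain ⟨hle, _⟩ := hpre
  have hnat : start.toNat ≤ iterable.length := by omega
  have h := lbm_loop_eq iterable char start.toNat hnat
  rw [h]
  unfold lbmAccB
  by_cases hpos : 0 ≤ start
  · rw [show ((start.toNat : Int)) = start by omega]
  · rw [show ((start.toNat : Int)) = 0 by omega,
        show start = - (-start) by ring]
    rw [PySem.List.pyRange_one_eq_nil (by omega),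
        PySem.List.pyRange_one_eq_nil (by omega)]
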